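-- pv_equiv track=rewrite | github.com/rohitsadhu1947/Arabiasanctions | backend/app/engine/scorer.py | _check_nationality_match
-- ===== SOURCE A (Python) =====
-- from typing import Dict, List, Optional, Tuple
--
-- def _check_nationality_match(query: Optional[str], target: Optional[str]) -> bool:
--     """Check if nationalities match."""
--     if not query or not target:
--         return False
--
--     # Normalize and compare
--     q = query.strip().lower()
--     t = target.strip().lower()
--
--     # Direct match
--     if q == t:
--         return True
--
--     # Common variations
--     variations = {
--         "uae": ["united arab emirates", "emirates"],
--         "ksa": ["saudi arabia", "kingdom of saudi arabia", "saudi"],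
--         "usa": ["united states", "united states of america", "america"],
--         "uk": ["united kingdom", "great britain", "britain", "england"],
--     }
--
--     for canonical, aliases in variations.items():
--         all_forms = [canonical] + aliases
--         if q in all_forms and t in all_forms:
--             return True
--
--     return False
-- ===== SOURCE B (Python) =====
-- from typing import Optional
--
-- _VARIATIONS = {
--     "uae": ["united arab emirates", "emirates"],
--     "ksa": ["saudi arabia", "kingdom of saudi arabia", "saudi"],
--     "usa": ["united states", "united states of america", "america"],
--     "uk": ["united kingdom", "great britain", "britain", "england"],
-- }
--
-- # Reverse lookup: every form (canonical or alias) -> its canonical group key.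
-- _REV = {form: canonical
--         for canonical, aliases in _VARIATIONS.items()
--         for form in (canonical, *aliases)}
--
-- def _check_nationality_match(query: Optional[str], target: Optional[str]) -> bool:
--     if not query or not target:
--         return False
--     q = query.strip().lower()
--     t = target.strip().lower()
--     if q == t:
--         return True
--     gq = _REV.get(q)
--     return gq is not None and gq == _REV.get(t)
-- ===== Notes on version B (the rewrite author's own statement) =====
-- stated objective: idiomatic
-- what changed: Replaced the per-group scanning loop (building all_forms and doing two list membership tests per group) with a precomputed reverse dict mapping every form to its canonical group, so matching is two dict lookups.
import Mathlib
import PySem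

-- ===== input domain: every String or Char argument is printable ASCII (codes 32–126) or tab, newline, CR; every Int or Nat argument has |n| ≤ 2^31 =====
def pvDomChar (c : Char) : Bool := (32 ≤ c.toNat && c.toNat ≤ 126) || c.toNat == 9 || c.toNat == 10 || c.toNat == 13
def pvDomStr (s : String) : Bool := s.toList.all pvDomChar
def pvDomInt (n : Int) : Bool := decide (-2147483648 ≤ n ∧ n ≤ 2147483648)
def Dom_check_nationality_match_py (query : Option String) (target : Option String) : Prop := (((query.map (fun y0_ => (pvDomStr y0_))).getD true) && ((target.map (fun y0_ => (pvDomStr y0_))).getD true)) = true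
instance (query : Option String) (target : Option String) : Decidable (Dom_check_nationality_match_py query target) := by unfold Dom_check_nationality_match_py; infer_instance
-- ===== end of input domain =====

-- B replaces A's per-group scanning loop by a precomputed reverse form→canonical dict (idiomatic, no speed claim).
-- B replaces A's per-group scanning loop by a precomputed reverse form→canonical dict (idiomatic, no speed claim).

-- Python truthiness of an Optional[str]: None and "" are falsy (shared trivial helper, not part of either algorithm)
def pvOptStrTruthy : Option String → Bool
  | none => false
  | some s => !(s == "")

-- the common 's.strip().lower()' normalization ('q = …' / 't = …' local in both Pythons)
def pvNorm (s : Option String) : String := PySem.Str.lower (PySem.Str.strip (s.getD ""))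

-- ===== PORT A =====
def variationsA : List (String × List String) :=
  [("uae", ["united arab emirates", "emirates"]),
   ("ksa", ["saudi arabia", "kingdom of saudi arabia", "saudi"]),
   ("usa", ["united states", "united states of america", "america"]),
   ("uk", ["united kingdom", "great britain", "britain", "england"])]

-- 'for canonical, aliases in variations.items(): … return True' (early-return loop)
def loopA : List (String × List String) → String → String → Bool
  | [], _, _ => false
  | (canonical, aliases) :: rest, q, t =>
    let all_forms := [canonical] ++ aliases
    if all_forms.contains q && all_forms.contains t then true
    else loopA rest q t

def check_nationality_match_py (query : Option String) (target : Option String) : Bool :=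
  if !(pvOptStrTruthy query) || !(pvOptStrTruthy target) then false
  else if pvNorm query == pvNorm target then true
  else loopA variationsA (pvNorm query) (pvNorm target)

-- ===== PORT B =====
-- _REV: every form (canonical or alias) mapped to its canonical group key
def revB : PySem.Dict String String :=
  PySem.Dict.mk   -- dict literal with (visibly) distinct keys
    [("uae", "uae"), ("united arab emirates", "uae"), ("emirates", "uae"),
     ("ksa", "ksa"), ("saudi arabia", "ksa"), ("kingdom of saudi arabia", "ksa"), ("saudi", "ksa"),
     ("usa", "usa"), ("united states", "usa"), ("united states of america", "usa"), ("america", "usa"),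
     ("uk", "uk"), ("united kingdom", "uk"), ("great britain", "uk"), ("britain", "uk"), ("england", "uk")]

-- 'gq = _REV.get(q); return gq is not None and gq == _REV.get(t)'
def lookupB (q t : String) : Bool :=
  match revB.get? q with
  | none => false
  | some gq => gq == (revB.get? t).getD ""

def check_nationality_match_py_alt (query : Option String) (target : Option String) : Bool :=
  if !(pvOptStrTruthy query) || !(pvOptStrTruthy target) then false
  else if pvNorm query == pvNorm target then true
  else lookupB (pvNorm query) (pvNorm target)

-- ===== PRECONDITION & SPEC =====
def Spec_check_nationality_match_py (query : Option String) (target : Option String) (out : Bool) : Prop := out = check_nationality_match_py_alt query target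
instance (query : Option String) (target : Option String) (out : Bool) : Decidable (Spec_check_nationality_match_py query target out) := by unfold Spec_check_nationality_match_py; infer_instance

-- ===== CLAIM (what is proved, stated in full; the proofs are below) =====
def Claim_equal_check_nationality_match_py : Prop := ∀ (query : Option String) (target : Option String), Dom_check_nationality_match_py query target → Spec_check_nationality_match_py query target (check_nationality_match_py query target)

-- ===== LEMMAS AND PROOFS =====
-- Proof-side view of revB's lookup as a plain if-chain over the 16 forms.
def groupOf (s : String) : Option String :=
  if s = "uae" then some "uae" else if s = "united arab emirates" then some "uae"
  else if s = "emirates" then some "uae"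
  else if s = "ksa" then some "ksa" else if s = "saudi arabia" then some "ksa"
  else if s = "kingdom of saudi arabia" then some "ksa" else if s = "saudi" then some "ksa"
  else if s = "usa" then some "usa" else if s = "united states" then some "usa"
  else if s = "united states of america" then some "usa" else if s = "america" then some "usa"
  else if s = "uk" then some "uk" else if s = "united kingdom" then some "uk"
  else if s = "great britain" then some "uk" else if s = "britain" then some "uk"
  else if s = "england" then some "uk" else none

-- Each group's membership test and B's dict lookup, both expressed through groupOf.
lemma master (q : String) :
    ((["uae", "united arab emirates", "emirates"] : List String).contains q = (groupOf q == some "uae"))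
  ∧ ((["ksa", "saudi arabia", "kingdom of saudi arabia", "saudi"] : List String).contains q = (groupOf q == some "ksa"))
  ∧ ((["usa", "united states", "united states of america", "america"] : List String).contains q = (groupOf q == some "usa"))
  ∧ ((["uk", "united kingdom", "great britain", "britain", "england"] : List String).contains q = (groupOf q == some "uk"))
  ∧ revB.get? q = groupOf q := by
  by_cases h1 : q = "uae"; · subst h1; decide
  by_cases h2 : q = "united arab emirates"; · subst h2; decide
  by_cases h3 : q = "emirates"; · subst h3; decide
  by_cases h4 : q = "ksa"; · subst h4; decide
  by_cases h5 : q = "saudi arabia"; · subst h5; decide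
  by_cases h6 : q = "kingdom of saudi arabia"; · subst h6; decide
  by_cases h7 : q = "saudi"; · subst h7; decide
  by_cases h8 : q = "usa"; · subst h8; decide
  by_cases h9 : q = "united states"; · subst h9; decide
  by_cases h10 : q = "united states of america"; · subst h10; decide
  by_cases h11 : q = "america"; · subst h11; decide
  by_cases h12 : q = "uk"; · subst h12; decide
  by_cases h13 : q = "united kingdom"; · subst h13; decide
  by_cases h14 : q = "great britain"; · subst h14; decide
  by_cases h15 : q = "britain"; · subst h15; decide
  by_cases h16 : q = "england"; · subst h16; decide
  have hg : groupOf q = none := by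
    simp [groupOf, h1, h2, h3, h4, h5, h6, h7, h8, h9, h10, h11, h12, h13, h14, h15, h16]
  have hk : revB.get? q = none := by
    rw [PySem.Dict.get?_eq_none_iff_not_mem_keys]
    simp [revB, h1, h2, h3, h4, h5, h6, h7, h8, h9, h10, h11, h12, h13, h14, h15, h16]
  refine ⟨?_, ?_, ?_, ?_, by rw [hg, hk]⟩ <;>
    simp [hg, h1, h2, h3, h4, h5, h6, h7, h8, h9, h10, h11, h12, h13, h14, h15, h16]

lemma groupOf_range (q c : String) (h : groupOf q = some c) :
    c = "uae" ∨ c = "ksa" ∨ c = "usa" ∨ c = "uk" := by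
  by_cases h1 : q = "uae"; · subst h1; simp_all [groupOf]
  by_cases h2 : q = "united arab emirates"; · subst h2; simp_all [groupOf]
  by_cases h3 : q = "emirates"; · subst h3; simp_all [groupOf]
  by_cases h4 : q = "ksa"; · subst h4; simp_all [groupOf]
  by_cases h5 : q = "saudi arabia"; · subst h5; simp_all [groupOf]
  by_cases h6 : q = "kingdom of saudi arabia"; · subst h6; simp_all [groupOf]
  by_cases h7 : q = "saudi"; · subst h7; simp_all [groupOf]
  by_cases h8 : q = "usa"; · subst h8; simp_all [groupOf]
  by_cases h9 : q = "united states"; · subst h9; simp_all [groupOf]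
  by_cases h10 : q = "united states of america"; · subst h10; simp_all [groupOf]
  by_cases h11 : q = "america"; · subst h11; simp_all [groupOf]
  by_cases h12 : q = "uk"; · subst h12; simp_all [groupOf]
  by_cases h13 : q = "united kingdom"; · subst h13; simp_all [groupOf]
  by_cases h14 : q = "great britain"; · subst h14; simp_all [groupOf]
  by_cases h15 : q = "britain"; · subst h15; simp_all [groupOf]
  by_cases h16 : q = "england"; · subst h16; simp_all [groupOf]
  simp [groupOf, h1, h2, h3, h4, h5, h6, h7, h8, h9, h10, h11, h12, h13, h14, h15, h16] at h

lemma loop_eq_lookup (q t : String) :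
    loopA variationsA q t = lookupB q t := by
  unfold lookupB
  obtain ⟨q1, q2, q3, q4, q5⟩ := master q
  obtain ⟨t1, t2, t3, t4, t5⟩ := master t
  simp only [variationsA, loopA, List.cons_append, List.nil_append,
    q1, q2, q3, q4, t1, t2, t3, t4, q5, t5]
  rcases hq : groupOf q with _ | cq
  · simp
  · rcases ht : groupOf t with _ | ct
    · rcases groupOf_range q cq hq with h | h | h | h <;> subst h <;> simp
    · rcases groupOf_range q cq hq with h | h | h | h <;>
        rcases groupOf_range t ct ht with h' | h' | h' | h' <;>
        subst h <;> subst h' <;> simp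

-- ===== VERDICT (by name: the statement is the Claim_ definition above) =====
theorem check_nationality_match_py_spec : Claim_equal_check_nationality_match_py := by
  intro query target _
  unfold Spec_check_nationality_match_py check_nationality_match_py check_nationality_match_py_alt
  by_cases hb : (!(pvOptStrTruthy query) || !(pvOptStrTruthy target)) = true
  · rw [if_pos hb, if_pos hb]
  · rw [if_neg hb, if_neg hb]
    by_cases hq : (pvNorm query == pvNorm target) = true
    · rw [if_pos hq, if_pos hq]
    · rw [if_neg hq, if_neg hq]
      exact loop_eq_lookup _ _
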